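-- pv_equiv track=rewrite | github.com/hegdemanu/investment-recommendation-system | backend-express/scripts/generate_report.py | analyze_best_prediction_horizons
-- ===== SOURCE A (Python) =====
-- def analyze_best_prediction_horizons(predictions):
--     """Analyze which prediction horizons worked best for different stocks"""
--     horizons = {}
--     for ticker, data in predictions.items():
--         horizon = data['best_horizon_days']
--         if horizon not in horizons:
--             horizons[horizon] = []
--         horizons[horizon].append(ticker)
--
--     return horizons
-- ===== SOURCE B (Python) =====
-- def analyze_best_prediction_horizons(predictions):
--     """Analyze which prediction horizons worked best for different stocks"""
--     pairs = [(ticker, data['best_horizon_days']) for ticker, data in predictions.items()]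
--     seen = []
--     for _, horizon in pairs:
--         if horizon not in seen:
--             seen.append(horizon)
--     return {h: [t for t, hh in pairs if hh == h] for h in seen}
-- ===== Notes on version B (the rewrite author's own statement) =====
-- stated objective: alternative
-- what changed: A builds the grouping dict incrementally in one pass; B first extracts (ticker, horizon) pairs, computes the ordered distinct horizons, and then builds the result with a dict comprehension that filters the pairs once per horizon.
import Mathlib
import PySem

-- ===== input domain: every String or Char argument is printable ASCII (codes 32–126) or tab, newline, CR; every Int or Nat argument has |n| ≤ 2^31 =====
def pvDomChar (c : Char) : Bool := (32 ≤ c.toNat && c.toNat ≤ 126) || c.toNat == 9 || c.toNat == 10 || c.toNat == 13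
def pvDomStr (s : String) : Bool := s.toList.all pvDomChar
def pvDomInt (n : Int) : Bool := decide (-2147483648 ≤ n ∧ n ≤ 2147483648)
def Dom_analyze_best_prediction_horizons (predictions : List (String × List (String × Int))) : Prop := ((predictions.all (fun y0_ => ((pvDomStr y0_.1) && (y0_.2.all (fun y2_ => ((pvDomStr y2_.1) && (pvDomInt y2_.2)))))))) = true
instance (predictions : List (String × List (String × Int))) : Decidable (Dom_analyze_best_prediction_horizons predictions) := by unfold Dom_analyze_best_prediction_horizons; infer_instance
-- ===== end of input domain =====

-- B replaces A's incremental dict construction by a pairs/distinct-horizons/per-horizon-filter pipeline (alternative decomposition, same cost class).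

-- ===== PORT A =====
def analyze_best_prediction_horizons (predictions : List (String × List (String × Int))) : List (Int × List String) :=
  (predictions.foldl
    (fun (horizons : PySem.Dict Int (List String)) p =>
      -- data['best_horizon_days']; Pre_ excludes the KeyError case, so getD 0 is never reached on none
      let horizon : Int := ((PySem.Dict.mk p.2).get? "best_horizon_days").getD 0
      let horizons := if horizons.contains horizon then horizons else horizons.insert horizon ([] : List String)
      horizons.modify horizon [] (fun l => l ++ [p.1]))
    PySem.Dict.empty).items

-- ===== PORT B =====
def analyze_best_prediction_horizons_alt (predictions : List (String × List (String × Int))) : List (Int × List String) :=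
  let pairs : List (String × Int) :=
    predictions.map (fun p => (p.1, ((PySem.Dict.mk p.2).get? "best_horizon_days").getD 0))
  let seen : PySem.Set Int := pairs.foldl (fun s q => PySem.Set.add s q.2) []
  seen.map (fun h => (h, (pairs.filter (fun q => q.2 == h)).map (·.1)))

-- ===== PRECONDITION & SPEC =====
-- Pre_ excludes exactly the inputs on which Python A raises KeyError: some ticker's data dict lacks the 'best_horizon_days' key.
def Pre_analyze_best_prediction_horizons (predictions : List (String × List (String × Int))) : Prop :=
  ∀ p ∈ predictions, (PySem.Dict.mk p.2).contains "best_horizon_days" = true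
instance (predictions : List (String × List (String × Int))) : Decidable (Pre_analyze_best_prediction_horizons predictions) := by unfold Pre_analyze_best_prediction_horizons; infer_instance

def pvWitness_analyze_best_prediction_horizons : (List (String × List (String × Int))) :=
  [("AAPL", [("best_horizon_days", 7)]), ("MSFT", [("best_horizon_days", 30)]), ("GOOG", [("best_horizon_days", 7)])]

def Spec_analyze_best_prediction_horizons (predictions : List (String × List (String × Int))) (out : List (Int × List String)) : Prop := out = analyze_best_prediction_horizons_alt predictions
instance (predictions : List (String × List (String × Int))) (out : List (Int × List String)) : Decidable (Spec_analyze_best_prediction_horizons predictions out) := by unfold Spec_analyze_best_prediction_horizons; infer_instance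

-- ===== CLAIM (what is proved, stated in full; the proofs are below) =====
def Claim_equal_analyze_best_prediction_horizons : Prop := ∀ (predictions : List (String × List (String × Int))), Dom_analyze_best_prediction_horizons predictions → Pre_analyze_best_prediction_horizons predictions → Spec_analyze_best_prediction_horizons predictions (analyze_best_prediction_horizons predictions)

-- ===== LEMMAS AND PROOFS =====

-- A's "setdefault then append" step equals a single modify with default [].
lemma step_eq_modify (d : PySem.Dict Int (List String)) (k : Int) (t : String) :
    (if d.contains k then d else d.insert k ([] : List String)).modify k [] (fun l => l ++ [t])
      = d.modify k [] (fun l => l ++ [t]) := by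
  by_cases h : d.contains k
  · simp [h]
  · simp only [h, Bool.false_eq_true, if_false]
    unfold PySem.Dict.modify
    simp [h, PySem.Dict.getD_insert_self, PySem.Dict.insert_insert_self,
      PySem.Dict.getD_of_not_contains]

-- the grouping fold, characterised: items = ordered distinct keys, each with its filtered values
lemma groupfold_items (l : List (Int × String)) :
    (l.foldl (fun (d : PySem.Dict Int (List String)) q => d.modify q.1 [] (fun ls => ls ++ [q.2])) PySem.Dict.empty).items
    = (PySem.Set.ofList (l.map (·.1))).map (fun h => (h, (l.filter (fun q => q.1 == h)).map (·.2))) := by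
  have hnd : (l.foldl (fun (d : PySem.Dict Int (List String)) q => d.modify q.1 [] (fun ls => ls ++ [q.2])) PySem.Dict.empty).keys.Nodup :=
    PySem.Dict.nodup_keys_foldl_modify_key l (·.1) [] (fun d x ls => ls ++ [x.2]) PySem.Dict.empty (by simp)
  rw [PySem.Dict.items_eq_map_keys _ hnd []]
  rw [PySem.Dict.keys_foldl_modify_key]
  simp only [PySem.Dict.keys_empty, PySem.Set.update_nil_left]
  refine List.map_congr_left (fun h hh => ?_)
  rw [PySem.Dict.getD_foldl_modify_append, PySem.Dict.getD_empty]
  simp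

lemma fold_eq (predictions : List (String × List (String × Int)))
    (d : PySem.Dict Int (List String)) :
    predictions.foldl
      (fun (horizons : PySem.Dict Int (List String)) p =>
        let horizon : Int := ((PySem.Dict.mk p.2).get? "best_horizon_days").getD 0
        let horizons := if horizons.contains horizon then horizons else horizons.insert horizon ([] : List String)
        horizons.modify horizon [] (fun l => l ++ [p.1])) d
    = (predictions.map (fun p => (((PySem.Dict.mk p.2).get? "best_horizon_days").getD 0, p.1))).foldl
        (fun (horizons : PySem.Dict Int (List String)) q => horizons.modify q.1 [] (fun l => l ++ [q.2])) d := by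
  induction predictions generalizing d with
  | nil => rfl
  | cons p ps ih =>
    rw [List.foldl_cons, List.map_cons, List.foldl_cons, ih]
    congr 1
    exact step_eq_modify d _ p.1

-- ===== VERDICT (by name: the statement is the Claim_ definition above) =====
theorem analyze_best_prediction_horizons_spec : Claim_equal_analyze_best_prediction_horizons := by
  intro predictions _ _
  unfold Spec_analyze_best_prediction_horizons analyze_best_prediction_horizons analyze_best_prediction_horizons_alt
  rw [fold_eq, groupfold_items]
  simp only [List.map_map, List.filter_map, Function.comp_def,
    ← PySem.Set.update_map_eq_foldl_add, PySem.Set.update_nil_left]
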